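-- pv_equiv track=rewrite | github.com/sreejita09/AI-Study-Pal | services/knowledge_graph.py | _infer_prerequisites
-- ===== SOURCE A (Python) =====
-- from typing import Dict, List, Set, Tuple
--
-- def _infer_prerequisites(topic: str, all_topics: List[str]) -> List[str]:
--     """
--     Infer prerequisites from topic relationships
--
--     Args:
--         topic: Topic to find prerequisites for
--         all_topics: All available topics
--
--     Returns:
--         Inferred prerequisite topics
--     """
--     inferred = []
--     topic_lower = topic.lower()
--
--     # Topics containing "advanced", "intermediate" might depend on basics
--     if any(word in topic_lower for word in ["advanced", "intermediate", "expert"]):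
--         basic_versions = [t for t in all_topics if "basic" in t.lower() or "introduction" in t.lower()]
--         inferred.extend(basic_versions)
--
--     # If topic has multiple words, single word topics might be prerequisites
--     words = topic_lower.split()
--     if len(words) > 1:
--         for word in words:
--             matching = [t for t in all_topics if t.lower() == word]
--             if matching:
--                 inferred.extend(matching)
--
--     return list(set(inferred))
-- ===== SOURCE B (Python) =====
-- def _infer_prerequisites(topic, all_topics):
--     topic_lower = topic.lower()
--     advanced = any(k in topic_lower for k in ("advanced", "intermediate", "expert"))
--     split_words = topic_lower.split()
--     multiword = len(split_words) > 1
--     words = set(split_words)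
--     result = []
--     for t in all_topics:
--         tl = t.lower()
--         if advanced and ("basic" in tl or "introduction" in tl):
--             result.append(t)
--         if multiword and tl in words:
--             result.append(t)
--     return sorted(set(result))
-- ===== Notes on version B (the rewrite author's own statement) =====
-- stated objective: simpler
-- what changed: Replaces A's two separate comprehensions and the per-word rescan of all_topics by a single linear pass over all_topics with a precomputed word set, and returns the deduplicated matches in sorted order (A's list(set(...)) order is hash-arbitrary; outputs agree as sets).
import Mathlib
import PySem

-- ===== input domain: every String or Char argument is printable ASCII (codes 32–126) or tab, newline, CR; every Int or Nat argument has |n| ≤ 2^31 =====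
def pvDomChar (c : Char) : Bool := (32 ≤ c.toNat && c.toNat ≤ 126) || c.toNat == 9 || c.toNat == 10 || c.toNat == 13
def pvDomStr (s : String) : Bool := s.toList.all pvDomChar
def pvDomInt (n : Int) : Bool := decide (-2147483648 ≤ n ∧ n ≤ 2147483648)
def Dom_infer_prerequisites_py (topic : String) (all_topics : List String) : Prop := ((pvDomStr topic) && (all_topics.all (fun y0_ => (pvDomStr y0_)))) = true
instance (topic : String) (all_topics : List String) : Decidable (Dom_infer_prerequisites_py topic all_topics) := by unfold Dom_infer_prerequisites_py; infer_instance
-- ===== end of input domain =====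

-- B replaces A's two comprehensions and per-word rescan by one linear pass over all_topics with a
-- precomputed word set (objective: simpler single traversal). Python's list(set(...)) order is
-- hash-arbitrary, so both ports canonicalise the final dedup to sorted order (outputs are compared
-- as sets); equivalence is about the returned set of topics.

-- ===== PORT A =====
-- "basic" in t.lower() or "introduction" in t.lower()
def pvBasicCond (t : String) : Bool :=
  PySem.Str.isIn "basic" (PySem.Str.lower t) || PySem.Str.isIn "introduction" (PySem.Str.lower t)

def infer_prerequisites_py (topic : String) (all_topics : List String) : List String :=
  let topic_lower := PySem.Str.lower topic
  -- if any(word in topic_lower for word in ["advanced","intermediate","expert"]): extend basic_versions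
  let inferred : List String :=
    if (["advanced", "intermediate", "expert"].any fun w => PySem.Str.isIn w topic_lower) then
      [] ++ all_topics.filter pvBasicCond
    else []
  let words := PySem.Str.split₀ topic_lower
  let inferred :=
    if words.length > 1 then
      words.foldl (fun acc word =>
        let matching := all_topics.filter (fun t => PySem.Str.lower t == word)
        if matching.isEmpty then acc else acc ++ matching) inferred
    else inferred
  -- list(set(inferred)): hash-order in Python, ported canonically as the sorted dedup
  PySem.List.sorted (PySem.Set.ofList inferred) (fun x => x) false

-- ===== PORT B =====
def infer_prerequisites_py_alt (topic : String) (all_topics : List String) : List String :=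
  let topic_lower := PySem.Str.lower topic
  let advanced := ["advanced", "intermediate", "expert"].any fun w => PySem.Str.isIn w topic_lower
  let split_words := PySem.Str.split₀ topic_lower
  let multiword := split_words.length > 1
  let words := PySem.Set.ofList split_words
  let result := all_topics.foldl (fun acc t =>
    let tl := PySem.Str.lower t
    let acc := if advanced && pvBasicCond t then acc ++ [t] else acc
    if multiword && PySem.Set.contains words tl then acc ++ [t] else acc) []
  PySem.List.sorted (PySem.Set.ofList result) (fun x => x) false

-- ===== PRECONDITION & SPEC =====
def Spec_infer_prerequisites_py (topic : String) (all_topics : List String) (out : List String) : Prop := out = infer_prerequisites_py_alt topic all_topics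
instance (topic : String) (all_topics : List String) (out : List String) : Decidable (Spec_infer_prerequisites_py topic all_topics out) := by unfold Spec_infer_prerequisites_py; infer_instance

-- ===== CLAIM (what is proved, stated in full; the proofs are below) =====
def Claim_equal_infer_prerequisites_py : Prop := ∀ (topic : String) (all_topics : List String), Dom_infer_prerequisites_py topic all_topics → Spec_infer_prerequisites_py topic all_topics (infer_prerequisites_py topic all_topics)

-- ===== LEMMAS AND PROOFS =====

-- membership in A's per-word extend loop
theorem mem_words_fold (words all_topics : List String) (init : List String) (x : String) :
    x ∈ words.foldl (fun acc word =>
        let matching := all_topics.filter (fun t => PySem.Str.lower t == word)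
        if matching.isEmpty then acc else acc ++ matching) init ↔
      x ∈ init ∨ (x ∈ all_topics ∧ PySem.Str.lower x ∈ words) := by
  induction words generalizing init with
  | nil => simp
  | cons w ws ih =>
    simp only [List.foldl_cons, ih, List.mem_cons]
    by_cases h : (all_topics.filter (fun t => PySem.Str.lower t == w)).isEmpty
    · have hnone : ¬ (x ∈ all_topics ∧ PySem.Str.lower x = w) := by
        rintro ⟨hm, hw⟩
        have hx : x ∈ all_topics.filter (fun t => PySem.Str.lower t == w) :=
          List.mem_filter.mpr ⟨hm, by simp [hw]⟩
        rw [List.isEmpty_iff.mp h] at hx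
        simp at hx
      rw [if_pos h]
      tauto
    · rw [if_neg h]
      simp only [List.mem_append, List.mem_filter, beq_iff_eq]
      tauto

-- membership in B's single-pass accumulation
theorem mem_b_fold (adv mw : Bool) (words : PySem.Set String) (all_topics : List String)
    (init : List String) (x : String) :
    x ∈ all_topics.foldl (fun acc t =>
        let tl := PySem.Str.lower t
        let acc := if adv && pvBasicCond t then acc ++ [t] else acc
        if mw && PySem.Set.contains words tl then acc ++ [t] else acc) init ↔
      x ∈ init ∨ (x ∈ all_topics ∧
        ((adv = true ∧ pvBasicCond x = true) ∨ (mw = true ∧ PySem.Str.lower x ∈ words))) := by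
  have step : ∀ (c : Bool) (acc : List String) (t : String),
      x ∈ (if c = true then acc ++ [t] else acc) ↔ x ∈ acc ∨ (c = true ∧ x = t) := by
    intro c acc t; cases c <;> simp
  induction all_topics generalizing init with
  | nil => simp
  | cons t ts ih =>
    rw [List.foldl_cons]
    refine Iff.trans (ih _) ?_
    simp only [step]
    simp only [List.mem_cons, Bool.and_eq_true, PySem.Set.contains_iff]
    constructor
    · rintro (((hx | ⟨⟨ha, hb⟩, rfl⟩) | ⟨⟨hm, hw⟩, rfl⟩) | ⟨hts, hd⟩)
      · exact Or.inl hx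
      · exact Or.inr ⟨Or.inl rfl, Or.inl ⟨ha, hb⟩⟩
      · exact Or.inr ⟨Or.inl rfl, Or.inr ⟨hm, hw⟩⟩
      · exact Or.inr ⟨Or.inr hts, hd⟩
    · rintro (hx | ⟨rfl | hts, hd⟩)
      · exact Or.inl (Or.inl (Or.inl hx))
      · rcases hd with ⟨ha, hb⟩ | ⟨hm, hw⟩
        · exact Or.inl (Or.inl (Or.inr ⟨⟨ha, hb⟩, rfl⟩))
        · exact Or.inl (Or.inr ⟨⟨hm, hw⟩, rfl⟩)
      · exact Or.inr ⟨hts, hd⟩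

set_option maxHeartbeats 1600000 in
theorem infer_prerequisites_eq (topic : String) (all_topics : List String) :
    infer_prerequisites_py topic all_topics = infer_prerequisites_py_alt topic all_topics := by
  simp only [infer_prerequisites_py, infer_prerequisites_py_alt]
  apply PySem.List.sorted_eq_sorted_of_perm _ _ _ (fun _ _ h => h)
  apply (List.perm_ext_iff_of_nodup (PySem.Set.nodup_ofList _) (PySem.Set.nodup_ofList _)).mpr
  intro x
  rw [PySem.Set.mem_ofList, PySem.Set.mem_ofList, mem_b_fold]
  by_cases hmw : (PySem.Str.split₀ (PySem.Str.lower topic)).length > 1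
  · rw [if_pos hmw, mem_words_fold, decide_eq_true hmw]
    by_cases hadv : (["advanced", "intermediate", "expert"].any fun w =>
        PySem.Str.isIn w (PySem.Str.lower topic)) = true
    · rw [if_pos hadv]
      simp only [hadv, List.nil_append, List.mem_filter,
        List.not_mem_nil, PySem.Set.mem_ofList, true_and, false_or]
      tauto
    · rw [if_neg hadv]
      simp only [hadv, List.not_mem_nil, PySem.Set.mem_ofList, Bool.false_eq_true,
        false_and, true_and, false_or]
  · rw [if_neg hmw, decide_eq_false hmw]
    by_cases hadv : (["advanced", "intermediate", "expert"].any fun w =>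
        PySem.Str.isIn w (PySem.Str.lower topic)) = true
    · rw [if_pos hadv]
      simp only [hadv, List.nil_append, List.mem_filter, List.not_mem_nil,
        Bool.false_eq_true, false_and, or_false, true_and, false_or]
    · rw [if_neg hadv]
      simp only [hadv, List.not_mem_nil, Bool.false_eq_true, false_and, or_false, false_or]
      tauto

-- ===== VERDICT (by name: the statement is the Claim_ definition above) =====
theorem infer_prerequisites_py_spec : Claim_equal_infer_prerequisites_py := by
  intro topic all_topics _
  unfold Spec_infer_prerequisites_py
  exact infer_prerequisites_eq topic all_topics
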